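-- pv_equiv track=rewrite | github.com/milaogou/HELIX | benchmark_code/PyPOTS_tuning_configs/apply_tuned_configs.py | parse_directory_name
-- ===== SOURCE A (Python) =====
-- MODEL_MAPPING = {
--     'HELIX': 'HELIX',
--     'HELIX_NoFeatureEmbed': 'HELIX_NoFeatureEmbed',
--     'HELIX_NoFusion': 'HELIX_NoFusion',
--     'HELIX_NoHybrid': 'HELIX_NoHybrid',
--     'HELIX_NoRotaryPE': 'HELIX_NoRotaryPE',
--     'TEFN': 'TEFN',
--     'TimeMixerPP': 'TimeMixerPP',
--     'TimeMixer': 'TimeMixer',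
--     'ModernTCN': 'ModernTCN',
--     'ImputeFormer': 'ImputeFormer',
--     'MOMENT': 'MOMENT',
--     'TOTEM': 'TOTEM',
--     'TimeLLM': 'TimeLLM',
-- }
--
-- def parse_directory_name(dir_name: str):
--     """解析目录名，提取模型名和数据集名"""
--     # 移除 _tuning 后缀
--     name = dir_name.replace('_tuning', '')
--
--     # 先尝试匹配已知的模型名（按长度从长到短）
--     sorted_models = sorted(MODEL_MAPPING.keys(), key=len, reverse=True)
--
--     for model in sorted_models:
--         if name.startswith(model + '_'):
--             dataset_name = name[len(model) + 1:]  # +1 是为了跳过下划线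
--             return model, dataset_name
--
--     # 如果没有匹配，尝试用第一个下划线分割（兼容旧逻辑）
--     parts = name.split('_', 1)
--     if len(parts) == 2:
--         return parts[0], parts[1]
--
--     return None, None
-- ===== SOURCE B (Python) =====
-- MODEL_MAPPING = {
--     'HELIX': 'HELIX',
--     'HELIX_NoFeatureEmbed': 'HELIX_NoFeatureEmbed',
--     'HELIX_NoFusion': 'HELIX_NoFusion',
--     'HELIX_NoHybrid': 'HELIX_NoHybrid',
--     'HELIX_NoRotaryPE': 'HELIX_NoRotaryPE',
--     'TEFN': 'TEFN',
--     'TimeMixerPP': 'TimeMixerPP',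
--     'TimeMixer': 'TimeMixer',
--     'ModernTCN': 'ModernTCN',
--     'ImputeFormer': 'ImputeFormer',
--     'MOMENT': 'MOMENT',
--     'TOTEM': 'TOTEM',
--     'TimeLLM': 'TimeLLM',
-- }
--
-- def parse_directory_name(dir_name: str):
--     """Split a tuning-directory name into (model, dataset): scan the name once,
--     and at every underscore look the prefix before it up in MODEL_MAPPING,
--     remembering the last (= longest) prefix that is a key; fall back to the
--     first underscore if no prefix matches."""
--     name = dir_name.replace('_tuning', '')
--     best = None
--     for p, ch in enumerate(name):
--         if ch == '_' and name[:p] in MODEL_MAPPING: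
--             best = p
--     if best is not None:
--         return name[:best], name[best + 1:]
--     i = name.find('_')
--     if i >= 0:
--         return name[:i], name[i + 1:]
--     return None, None
-- ===== Notes on version B (the rewrite author's own statement) =====
-- stated objective: alternative
-- what changed: Instead of sorting the 13 model keys by length and testing each with startswith, B scans the name once left-to-right and at every underscore looks the preceding prefix up directly in MODEL_MAPPING, keeping the last (= longest) hit; the fallback splits at the first underscore position instead of calling the one-shot split method.
import Mathlib
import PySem

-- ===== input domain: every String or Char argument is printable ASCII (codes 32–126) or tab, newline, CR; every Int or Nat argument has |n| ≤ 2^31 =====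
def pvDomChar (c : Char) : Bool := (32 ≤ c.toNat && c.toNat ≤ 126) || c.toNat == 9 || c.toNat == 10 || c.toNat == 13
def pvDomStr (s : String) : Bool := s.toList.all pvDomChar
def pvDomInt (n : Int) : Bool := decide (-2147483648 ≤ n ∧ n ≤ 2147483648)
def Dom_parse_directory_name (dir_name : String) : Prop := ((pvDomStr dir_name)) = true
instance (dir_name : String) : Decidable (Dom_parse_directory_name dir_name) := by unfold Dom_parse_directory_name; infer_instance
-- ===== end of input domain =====

-- B replaces A's scan of the length-sorted model keys by a single left-to-right scan of the
-- name's underscore positions with direct dict lookups (objective: alternative).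

-- ===== PORT A =====
-- the module-level dict MODEL_MAPPING (distinct keys, insertion order)
def MODEL_MAPPING : PySem.Dict (List Char) (List Char) := PySem.Dict.mk
  [("HELIX".toList, "HELIX".toList),
   ("HELIX_NoFeatureEmbed".toList, "HELIX_NoFeatureEmbed".toList),
   ("HELIX_NoFusion".toList, "HELIX_NoFusion".toList),
   ("HELIX_NoHybrid".toList, "HELIX_NoHybrid".toList),
   ("HELIX_NoRotaryPE".toList, "HELIX_NoRotaryPE".toList),
   ("TEFN".toList, "TEFN".toList),
   ("TimeMixerPP".toList, "TimeMixerPP".toList),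
   ("TimeMixer".toList, "TimeMixer".toList),
   ("ModernTCN".toList, "ModernTCN".toList),
   ("ImputeFormer".toList, "ImputeFormer".toList),
   ("MOMENT".toList, "MOMENT".toList),
   ("TOTEM".toList, "TOTEM".toList),
   ("TimeLLM".toList, "TimeLLM".toList)]

-- A's for-loop over sorted_models with an early return; falling off the loop runs the
-- split('_', 1) fallback (the code after the loop)
def pvLoopA (name : List Char) : List (List Char) → Option String × Option String
  | [] =>
    let parts := PySem.Chars.splitOnMax name "_".toList 1
    if parts.length = 2 then
      (some (String.ofList (PySem.List.pyGetD parts 0 [])), some (String.ofList (PySem.List.pyGetD parts 1 [])))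
    else (none, none)
  | model :: ms =>
    if PySem.Chars.startswith name (model ++ "_".toList) then
      (some (String.ofList model),
       some (String.ofList (PySem.List.slice name (some ((model.length : Int) + 1)) none)))
    else pvLoopA name ms

def parse_directory_name (dir_name : String) : Option String × Option String :=
  let name := PySem.Chars.replace dir_name.toList "_tuning".toList "".toList
  let sorted_models := PySem.List.sorted MODEL_MAPPING.keys (fun k => k.length) true
  pvLoopA name sorted_models

-- ===== PORT B =====
-- B's loop: for p, ch in enumerate(name): if ch == '_' and name[:p] in MODEL_MAPPING: best = p
def pvBestUnderscore (name : List Char) : Option Int :=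
  (PySem.List.enumerate name 0).foldl
    (fun best pc =>
      if pc.2 == '_' && MODEL_MAPPING.contains (PySem.List.slice name none (some pc.1)) then
        some pc.1
      else best)
    none

def parse_directory_name_alt (dir_name : String) : Option String × Option String :=
  let name := PySem.Chars.replace dir_name.toList "_tuning".toList "".toList
  match pvBestUnderscore name with
  | some p =>
    (some (String.ofList (PySem.List.slice name none (some p))),
     some (String.ofList (PySem.List.slice name (some (p + 1)) none)))
  | none =>
    let i := PySem.Chars.find name "_".toList
    if 0 ≤ i then
      (some (String.ofList (PySem.List.slice name none (some i))),
       some (String.ofList (PySem.List.slice name (some (i + 1)) none)))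
    else (none, none)

-- ===== PRECONDITION & SPEC =====
def Spec_parse_directory_name (dir_name : String) (out : Option String × Option String) : Prop := out = parse_directory_name_alt dir_name
instance (dir_name : String) (out : Option String × Option String) : Decidable (Spec_parse_directory_name dir_name out) := by unfold Spec_parse_directory_name; infer_instance

-- ===== CLAIM (what is proved, stated in full; the proofs are below) =====
def Claim_equal_parse_directory_name : Prop := ∀ (dir_name : String), Dom_parse_directory_name dir_name → Spec_parse_directory_name dir_name (parse_directory_name dir_name)

-- ===== LEMMAS AND PROOFS =====

-- membership in a Dict's keys is exactly `contains`
theorem pv_contains_iff_mem_keys (d : PySem.Dict (List Char) (List Char)) (k : List Char) :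
    d.contains k = true ↔ k ∈ d.keys := by
  simp [PySem.Dict.contains, PySem.Dict.keys, List.any_eq_true, List.mem_map]

-- B's fold keeps the LAST hit
theorem pv_foldl_lasthit (q : Int × Char → Bool) (l : List (Int × Char)) (b0 : Option Int) :
    l.foldl (fun b pc => if q pc then some pc.1 else b) b0 =
      (match (l.filter q).getLast? with
       | some pc => some pc.1
       | none => b0) := by
  induction l using List.reverseRecOn generalizing b0 with
  | nil => simp
  | append_singleton l x ih =>
      rw [List.foldl_append, List.filter_append]
      by_cases hx : q x = true
      · simp [hx]
      · simp only [Bool.not_eq_true] at hx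
        simp [hx, ih]

-- hit predicate of B's loop, over natural positions
def pvHit (name : List Char) (j : Nat) : Prop :=
  ∃ h : j < name.length, name[j] = '_' ∧ MODEL_MAPPING.contains (name.take j) = true

-- the Bool test inside B's loop, read on an element of enumerate
theorem pv_q_iff (name : List Char) (pc : Int × Char) (hmem : pc ∈ PySem.List.enumerate name 0) :
    ((pc.2 == '_' && MODEL_MAPPING.contains (PySem.List.slice name none (some pc.1))) = true) ↔
      ∃ k : Nat, pc.1 = (k : Int) ∧ pvHit name k := by
  rw [PySem.List.mem_enumerate_iff] at hmem
  obtain ⟨k, hk, rfl⟩ := hmem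
  simp only [zero_add]
  rw [PySem.List.slice_to_natCast]
  constructor
  · rintro h
    simp only [Bool.and_eq_true, beq_iff_eq] at h
    exact ⟨k, rfl, hk, h.1, h.2⟩
  · rintro ⟨k', hk', hit⟩
    have : k' = k := by exact_mod_cast hk'.symm
    subst this
    obtain ⟨_, hc, hco⟩ := hit
    simp [hc, hco]

-- pvBestUnderscore returns the LARGEST hit position, or none when there is no hit
theorem pv_best_some (name : List Char) (p : Int) (h : pvBestUnderscore name = some p) :
    ∃ j : Nat, p = (j : Int) ∧ pvHit name j ∧ ∀ i : Nat, pvHit name i → i ≤ j := by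
  unfold pvBestUnderscore at h
  rw [pv_foldl_lasthit] at h
  set q : Int × Char → Bool := fun pc => pc.2 == '_' && MODEL_MAPPING.contains (PySem.List.slice name none (some pc.1)) with hq
  revert h
  cases hl : ((PySem.List.enumerate name 0).filter q).getLast? with
  | none => intro h; cases h
  | some pc =>
      intro h
      cases h
      have hpcmem : pc ∈ (PySem.List.enumerate name 0).filter q := List.mem_of_getLast? hl
      rw [List.mem_filter] at hpcmem
      obtain ⟨j, hj, hit⟩ := (pv_q_iff name pc hpcmem.1).mp hpcmem.2
      refine ⟨j, hj, hit, ?_⟩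
      intro i hiti
      obtain ⟨hi, hci, hcoi⟩ := hiti
      have hmemi : ((i : Int), name[i]) ∈ PySem.List.enumerate name 0 := by
        rw [PySem.List.mem_enumerate_iff]; exact ⟨i, hi, by simp⟩
      have hqi : q ((i : Int), name[i]) = true := by
        rw [pv_q_iff name _ hmemi]; exact ⟨i, rfl, hi, hci, hcoi⟩
      have hmemf : ((i : Int), name[i]) ∈ (PySem.List.enumerate name 0).filter q :=
        List.mem_filter.mpr ⟨hmemi, hqi⟩
      have hpw : ((PySem.List.enumerate name 0).filter q).Pairwise (fun p q => p.1 < q.1) :=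
        (PySem.List.pairwise_lt_enumerate name 0).filter q
      obtain ⟨ys, hys⟩ := List.getLast?_eq_some_iff.mp hl
      rw [hys] at hmemf hpw
      rcases List.mem_append.mp hmemf with hin | hin
      · have := (List.pairwise_append.mp hpw).2.2 _ hin pc (by simp)
        have : ((i:Int)) < pc.1 := this
        rw [hj] at this
        exact_mod_cast le_of_lt this
      · simp at hin
        have : ((i:Int)) = pc.1 := by rw [← hin]
        rw [hj] at this
        exact le_of_eq (by exact_mod_cast this)

theorem pv_best_none (name : List Char) (h : pvBestUnderscore name = none) :
    ∀ j : Nat, ¬ pvHit name j := by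
  intro j hit
  unfold pvBestUnderscore at h
  rw [pv_foldl_lasthit] at h
  set q : Int × Char → Bool := fun pc => pc.2 == '_' && MODEL_MAPPING.contains (PySem.List.slice name none (some pc.1)) with hq
  obtain ⟨hj, hc, hco⟩ := hit
  have hmemj : ((j : Int), name[j]) ∈ PySem.List.enumerate name 0 := by
    rw [PySem.List.mem_enumerate_iff]; exact ⟨j, hj, by simp⟩
  have hqj : q ((j : Int), name[j]) = true := by
    rw [pv_q_iff name _ hmemj]; exact ⟨j, rfl, hj, hc, hco⟩
  have hmemf : ((j : Int), name[j]) ∈ (PySem.List.enumerate name 0).filter q :=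
    List.mem_filter.mpr ⟨hmemj, hqj⟩
  revert h
  cases hl : ((PySem.List.enumerate name 0).filter q).getLast? with
  | none =>
      intro _
      rw [List.getLast?_eq_none_iff] at hl
      rw [hl] at hmemf
      cases hmemf
  | some pc => intro h; cases h

-- a model key passes A's startswith test iff its length is an underscore position whose prefix it is
theorem pv_match_iff (name k : List Char) :
    PySem.Chars.startswith name (k ++ "_".toList) = true ↔
      ∃ h : k.length < name.length, name[k.length] = '_' ∧ name.take k.length = k := by
  rw [PySem.Chars.startswith_iff]
  constructor
  · rintro ⟨t, ht⟩
    have ht' : name = k ++ ('_' :: t) := by rw [← ht]; simp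
    subst ht'
    have hlen : k.length < (k ++ ('_' :: t)).length := by simp
    refine ⟨hlen, ?_, by simp⟩
    rw [List.getElem_append_right (by omega)]
    simp
  · rintro ⟨h, hc, ht⟩
    refine ⟨name.drop (k.length + 1), ?_⟩
    conv_rhs => rw [← List.take_append_drop k.length name]
    rw [List.drop_eq_getElem_cons h, ht, hc]
    simp

-- A's loop is find? followed by the shared continuations
theorem pv_loopA_eq_find? (name : List Char) (L : List (List Char)) :
    pvLoopA name L =
      (match L.find? (fun m => PySem.Chars.startswith name (m ++ "_".toList)) with
       | some model =>
         (some (String.ofList model),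
          some (String.ofList (PySem.List.slice name (some ((model.length : Int) + 1)) none)))
       | none => pvLoopA name []) := by
  induction L with
  | nil => simp
  | cons m ms ih =>
      rw [List.find?_cons]
      by_cases h : PySem.Chars.startswith name (m ++ ['_']) = true
      · simp [pvLoopA, h]
      · simp only [Bool.not_eq_true] at h
        simp [pvLoopA, h, ih]

-- first match of a length-descending list is the longest matching key
theorem pv_find?_eq_longest (M : List Char → Bool) (L : List (List Char)) (kb : List Char)
    (hmem : kb ∈ L) (hM : M kb = true)
    (hmax : ∀ k ∈ L, M k = true → k.length ≤ kb.length ∧ (k.length = kb.length → k = kb))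
    (hsort : L.Pairwise (fun a b => b.length ≤ a.length)) :
    L.find? M = some kb := by
  induction L with
  | nil => cases hmem
  | cons a l ih =>
      rw [List.find?_cons]
      by_cases ha : M a = true
      · have h1 := hmax a (by simp) ha
        rcases List.mem_cons.mp hmem with rfl | hmem'
        · simp [ha]
        · have h2 : kb.length ≤ a.length := (List.pairwise_cons.mp hsort).1 kb hmem'
          have heq : a = kb := h1.2 (le_antisymm h1.1 h2)
          subst heq
          simp [ha]
      · simp only [Bool.not_eq_true] at ha
        rcases List.mem_cons.mp hmem with rfl | hmem'
        · rw [hM] at ha; cases ha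
        · rw [ha]
          exact ih hmem' (fun k hk hMk => hmax k (by simp [hk]) hMk) (List.pairwise_cons.mp hsort).2

-- split(name, '_', 1): the exhausted-maxsplit tail of splitOnMax.go
theorem pv_go0 (l : List Char) (fuel : Nat) (cur : List Char) (acc : List (List Char))
    (hf : l.length ≤ fuel) :
    PySem.Chars.splitOnMax.go ['_'] fuel 0 l cur acc = acc.reverse ++ [cur.reverse ++ l] := by
  cases fuel with
  | zero => rw [PySem.Chars.splitOnMax.go]; simp
  | succ f =>
      cases l with
      | nil => rw [PySem.Chars.splitOnMax.go]; simp; omega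
      | cons c rest => rw [PySem.Chars.splitOnMax.go]; simp

theorem pv_goMax1 (l : List Char) : ∀ (fuel : Nat) (cur : List Char) (acc : List (List Char)),
    l.length ≤ fuel →
    PySem.Chars.splitOnMax.go ['_'] fuel 1 l cur acc =
      acc.reverse ++
        (match List.findIdx? (· == '_') l with
         | some j => [cur.reverse ++ l.take j, l.drop (j + 1)]
         | none => [cur.reverse ++ l]) := by
  induction l with
  | nil =>
      intro fuel cur acc _
      cases fuel with
      | zero => rw [PySem.Chars.splitOnMax.go]; simp
      | succ f => rw [PySem.Chars.splitOnMax.go]; simp; omega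
  | cons a rest ih =>
      intro fuel cur acc hf
      cases fuel with
      | zero => simp at hf
      | succ f =>
          rw [PySem.Chars.splitOnMax.go]
          by_cases ha : a = '_'
          · subst ha
            simp only [List.findIdx?_cons]
            have hpre : List.isPrefixOf ['_'] ('_' :: rest) = true := by simp [List.isPrefixOf]
            simp only [hpre, if_true]
            rw [show (1:Nat) - 1 = 0 from rfl]
            rw [pv_go0 _ f _ _ (by simpa using Nat.le_of_succ_le_succ hf)]
            simp
          · have hpre : List.isPrefixOf ['_'] (a :: rest) = false := by
              simp [List.isPrefixOf, Ne.symm ha]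
            simp only [hpre]
            rw [ih f (a :: cur) acc (by simpa using Nat.le_of_succ_le_succ hf)]
            simp only [List.findIdx?_cons, beq_iff_eq, if_neg ha]
            cases hfi : List.findIdx? (· == '_') rest with
            | none => simp
            | some j => simp [List.take_succ_cons, List.drop_succ_cons]

-- [c] <+: name.drop i says exactly what name[i]? is
theorem pv_prefix_drop (name : List Char) (i : Nat) (c : Char) :
    ([c] <+: name.drop i) ↔ name[i]? = some c := by
  rw [← List.head?_drop]
  constructor
  · rintro ⟨t, ht⟩; rw [← ht]; simp
  · intro h
    cases hd : name.drop i with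
    | nil => rw [hd] at h; simp at h
    | cons a t =>
        rw [hd] at h; simp at h
        exact ⟨t, by simp [h]⟩

-- str.find('_') is the first underscore index
theorem pv_find_eq_findIdx (name : List Char) :
    PySem.Chars.find name ['_'] =
      (match List.findIdx? (· == '_') name with
       | some j => (j : Int)
       | none => -1) := by
  cases hfi : List.findIdx? (· == '_') name with
  | none =>
      rw [List.findIdx?_eq_none_iff] at hfi
      rw [PySem.Chars.find_eq_neg_one_iff]
      rintro ⟨s, t, hst⟩
      have : '_' ∈ name := by rw [← hst]; simp
      have := hfi '_' this
      simp at this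
  | some j =>
      rw [List.findIdx?_eq_some_iff_findIdx_eq] at hfi
      obtain ⟨hjl, hje⟩ := hfi
      have hgj : name[j] = '_' := by
        have := @List.findIdx_getElem _ (· == '_') name (hje ▸ hjl)
        simpa [hje] using this
      have hmem : '_' ∈ name := hgj ▸ List.getElem_mem hjl
      have hinf : ['_'] <:+: name := by
        obtain ⟨s, t, hst⟩ := List.append_of_mem hmem
        exact ⟨s, t, by rw [hst]; simp⟩
      have hnn : 0 ≤ PySem.Chars.find name ['_'] := (PySem.Chars.find_nonneg_iff _ _).mpr hinf
      obtain ⟨hpre, hmin⟩ := PySem.Chars.find_spec hnn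
      set m : Nat := (PySem.Chars.find name ['_']).toNat with hm
      have hgm : name[m]? = some '_' := (pv_prefix_drop _ _ _).mp hpre
      have hmj : m = j := by
        rcases lt_trichotomy m j with h | h | h
        · have := List.not_of_lt_findIdx (hje ▸ h)
          have hml : m < name.length := by omega
          rw [List.getElem?_eq_getElem hml] at hgm
          simp at this hgm
          exact absurd hgm this
        · exact h
        · exact absurd ((pv_prefix_drop _ _ _).mpr (by rw [List.getElem?_eq_getElem hjl, hgj])) (hmin j h)
      simp only []
      omega

theorem pv_splitOnMax_one (name : List Char) :
    PySem.Chars.splitOnMax name "_".toList 1 =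
      (match List.findIdx? (· == '_') name with
       | some j => [name.take j, name.drop (j + 1)]
       | none => [name]) := by
  have h : PySem.Chars.splitOnMax name "_".toList 1
      = PySem.Chars.splitOnMax.go ['_'] (name.length + 1) 1 name [] [] := by
    rw [PySem.Chars.splitOnMax]; norm_num; rfl
  rw [h, pv_goMax1 name (name.length + 1) [] [] (by omega)]
  cases hfi : List.findIdx? (· == '_') name <;> simp

-- the two fallbacks agree
theorem pv_fallback_eq (name : List Char) :
    pvLoopA name [] =
      (let i := PySem.Chars.find name "_".toList
       if 0 ≤ i then
         (some (String.ofList (PySem.List.slice name none (some i))),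
          some (String.ofList (PySem.List.slice name (some (i + 1)) none)))
       else (none, none)) := by
  simp only [pvLoopA, pv_splitOnMax_one]
  have hf : PySem.Chars.find name "_".toList =
      (match List.findIdx? (· == '_') name with
       | some j => (j : Int)
       | none => -1) := pv_find_eq_findIdx name
  cases hfi : List.findIdx? (· == '_') name with
  | none =>
      simp only [hfi] at hf ⊢
      rw [hf]
      norm_num
  | some j =>
      simp only [hfi] at hf ⊢
      rw [hf]
      have h1 : ((j : Int) + 1) = ((j + 1 : Nat) : Int) := by push_cast; ring
      rw [h1, PySem.List.slice_to_natCast, PySem.List.slice_from_natCast]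
      simp [pysem]

-- core equality on the post-replace name
theorem pv_core_eq (name : List Char) :
    pvLoopA name (PySem.List.sorted MODEL_MAPPING.keys (fun k => k.length) true) =
      (match pvBestUnderscore name with
       | some p =>
         (some (String.ofList (PySem.List.slice name none (some p))),
          some (String.ofList (PySem.List.slice name (some (p + 1)) none)))
       | none =>
         let i := PySem.Chars.find name "_".toList
         if 0 ≤ i then
           (some (String.ofList (PySem.List.slice name none (some i))),
            some (String.ofList (PySem.List.slice name (some (i + 1)) none)))
         else (none, none)) := by
  rw [pv_loopA_eq_find?]
  cases hb : pvBestUnderscore name with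
  | some p =>
      obtain ⟨j, rfl, hit, hmax⟩ := pv_best_some name p hb
      obtain ⟨hj, hc, hco⟩ := hit
      set kb := name.take j with hkb
      have hkb_len : kb.length = j := by
        rw [hkb, List.length_take]; omega
      have hfind : (PySem.List.sorted MODEL_MAPPING.keys (fun k => k.length) true).find?
          (fun m => PySem.Chars.startswith name (m ++ "_".toList)) = some kb := by
        apply pv_find?_eq_longest
        · rw [PySem.List.mem_sorted]
          exact (pv_contains_iff_mem_keys _ _).mp hco
        · rw [pv_match_iff]
          refine ⟨by omega, ?_, ?_⟩
          · have : kb.length = j := hkb_len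
            simp_rw [this]; exact hc
          · rw [hkb_len]
        · intro k hkmem hMk
          rw [pv_match_iff] at hMk
          obtain ⟨hkl, hkc, hkt⟩ := hMk
          have hkco : MODEL_MAPPING.contains (name.take k.length) = true := by
            rw [hkt]
            exact (pv_contains_iff_mem_keys _ _).mpr ((PySem.List.mem_sorted _ _ _ _).mp hkmem)
          have hle : k.length ≤ j := hmax k.length ⟨hkl, hkc, hkco⟩
          refine ⟨by omega, ?_⟩
          intro he
          rw [hkb_len] at he
          rw [← hkt, he, ← hkb]
        · exact PySem.List.sorted_pairwise_rev _ _
      rw [hfind]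
      dsimp only
      rw [PySem.List.slice_to_natCast]
      have h1 : ((kb.length : Int) + 1) = ((j + 1 : Nat) : Int) := by rw [hkb_len]; push_cast; ring
      have h2 : ((j : Int) + 1) = ((j + 1 : Nat) : Int) := by push_cast; ring
      rw [h1, h2, PySem.List.slice_from_natCast]
  | none =>
      have hnone := pv_best_none name hb
      have hfind : (PySem.List.sorted MODEL_MAPPING.keys (fun k => k.length) true).find?
          (fun m => PySem.Chars.startswith name (m ++ "_".toList)) = none := by
        rw [List.find?_eq_none]
        intro k hkmem
        rw [Bool.not_eq_true]
        rw [← Bool.not_eq_true, pv_match_iff]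
        rintro ⟨hkl, hkc, hkt⟩
        exact hnone k.length ⟨hkl, hkc, by
          rw [hkt]
          exact (pv_contains_iff_mem_keys _ _).mpr ((PySem.List.mem_sorted _ _ _ _).mp hkmem)⟩
      rw [hfind]
      dsimp only
      exact pv_fallback_eq name

-- ===== VERDICT (by name: the statement is the Claim_ definition above) =====
theorem parse_directory_name_spec : Claim_equal_parse_directory_name := by
  intro dir_name _
  unfold Spec_parse_directory_name parse_directory_name parse_directory_name_alt
  exact pv_core_eq _
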